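-- pv_equiv track=rewrite | github.com/tpnanh/DACNTT2_N26 | DA-26_Web/Scripts/mysite/mypage/views.py | getMicParam
-- ===== SOURCE A (Python) =====
-- def getMicParam( param_url):
--     param = ""
--     checkFirstDash = False
--     for i in range(len(param_url),0,-1):
--         if (param_url[i-1] != "/"):
--             param += param_url[i-1]
--         else:
--             if (checkFirstDash == False):
--                 checkFirstDash = True
--                 param = ""
--             else:
--                 return param[::-1]
-- ===== SOURCE B (Python) =====
-- def getMicParam(param_url):
--     last = param_url.rfind('/')
--     if last == -1:
--         return None
--     prev = param_url.rfind('/', 0, last)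
--     if prev == -1:
--         return None
--     return param_url[prev + 1:last]
-- ===== Notes on version B (the rewrite author's own statement) =====
-- stated objective: simpler
-- what changed: Replaces the backward character-by-character scan with accumulator string and first-slash flag by two rfind calls locating the last two slashes and one slice between them.
import Mathlib
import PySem

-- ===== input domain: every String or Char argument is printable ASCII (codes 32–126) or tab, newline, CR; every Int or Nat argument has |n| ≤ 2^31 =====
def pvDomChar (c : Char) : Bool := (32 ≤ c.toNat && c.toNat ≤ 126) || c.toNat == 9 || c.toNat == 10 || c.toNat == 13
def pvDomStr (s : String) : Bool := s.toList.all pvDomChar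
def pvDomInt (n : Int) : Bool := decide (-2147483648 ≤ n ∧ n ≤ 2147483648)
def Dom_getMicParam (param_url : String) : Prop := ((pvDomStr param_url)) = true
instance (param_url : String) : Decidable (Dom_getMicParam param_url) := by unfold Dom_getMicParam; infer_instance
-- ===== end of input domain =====

-- B locates the last two slashes with rfind and slices between them, instead of A's
-- backward character scan with an accumulator and a first-slash flag (objective: simpler).

-- ===== PORT A =====
-- A's for-loop over range(len(param_url), 0, -1) with early return, as structural
-- recursion on the index list; state: param (accumulated chars) and checkFirstDash
def pvLoopA (s : List Char) : List Int → List Char → Bool → Option String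
  | [], _, _ => none                                   -- loop ends: falls off the function, returns None
  | i :: rest, param, flag =>
    match PySem.List.pyGet? s (i - 1) with
    | none => none                                     -- unreachable: range indices are in bounds
    | some c =>
      if c ≠ '/' then pvLoopA s rest (param ++ [c]) flag
      else if flag = false then pvLoopA s rest [] true
      else some (String.ofList param.reverse)          -- return param[::-1]

def getMicParam (param_url : String) : Option String :=
  pvLoopA param_url.toList
    (PySem.List.pyRange (PySem.Str.len param_url) 0 (-1)) [] false

-- ===== PORT B =====
def getMicParam_alt (param_url : String) : Option String :=
  let last := PySem.Str.rfind param_url "/"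
  if last = -1 then none
  else
    let prev := PySem.Str.rfindFrom param_url "/" 0 (some last)
    if prev = -1 then none
    else some (PySem.Str.slice param_url (some (prev + 1)) (some last))

-- ===== PRECONDITION & SPEC =====
def Spec_getMicParam (param_url : String) (out : Option String) : Prop := out = getMicParam_alt param_url
instance (param_url : String) (out : Option String) : Decidable (Spec_getMicParam param_url out) := by unfold Spec_getMicParam; infer_instance

-- ===== CLAIM (what is proved, stated in full; the proofs are below) =====
def Claim_equal_getMicParam : Prop := ∀ (param_url : String), Dom_getMicParam param_url → Spec_getMicParam param_url (getMicParam param_url)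

-- ===== LEMMAS AND PROOFS =====

-- A's backward scan, rephrased on the reversed character list
def pvGo : List Char → List Char → Bool → Option String
  | [], _, _ => none
  | c :: t, param, flag =>
    if c ≠ '/' then pvGo t (param ++ [c]) flag
    else if flag = false then pvGo t [] true
    else some (String.ofList param.reverse)

-- index of the last '/' in a char list
def pvLast? : List Char → Option Nat
  | [] => none
  | c :: t =>
    match pvLast? t with
    | some j => some (j + 1)
    | none => if c = '/' then some 0 else none

theorem pvRange_succ (n : Nat) :
    PySem.List.pyRange ((n + 1 : Nat) : Int) 0 (-1)
      = ((n + 1 : Nat) : Int) :: PySem.List.pyRange ((n : Nat) : Int) 0 (-1) := by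
  by_cases hn : n = 0
  · subst hn; decide
  · simp only [PySem.List.pyRange]
    norm_num
    rw [List.range_succ_eq_map, List.map_cons, List.map_map, if_pos (Nat.pos_of_ne_zero hn)]
    refine List.cons_eq_cons.mpr ⟨by push_cast; ring, ?_⟩
    apply List.map_congr_left
    intro k _
    simp only [Function.comp_apply]
    push_cast [Nat.succ_eq_add_one]; ring

theorem pvLoopA_eq_pvGo (s : List Char) (k : Nat) (hk : k ≤ s.length)
    (param : List Char) (flag : Bool) :
    pvLoopA s (PySem.List.pyRange ((k : Nat) : Int) 0 (-1)) param flag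
      = pvGo ((s.take k).reverse) param flag := by
  induction k generalizing param flag with
  | zero =>
    have h0 : PySem.List.pyRange ((0 : Nat) : Int) 0 (-1) = [] := by decide
    simp [h0, pvLoopA, pvGo]
  | succ k ih =>
    have hk' : k < s.length := by omega
    rw [pvRange_succ]
    have hidx : ((k + 1 : Nat) : Int) - 1 = ((k : Nat) : Int) := by push_cast; ring
    have hget : PySem.List.pyGet? s (((k + 1 : Nat) : Int) - 1) = some s[k] := by
      rw [hidx, PySem.List.pyGet?_natCast, List.getElem?_eq_getElem hk']
    have htake : (s.take (k + 1)).reverse = s[k] :: (s.take k).reverse := by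
      rw [List.take_add_one, List.getElem?_eq_getElem hk']
      simp
    rw [htake]
    by_cases hc : s[k] = '/'
    · by_cases hf : flag = false
      · simp only [pvLoopA, hget, pvGo, hc, hf]
        simp [ih (by omega)]
      · simp only [pvLoopA, hget, pvGo, hc, hf]
        simp
    · simp only [pvLoopA, hget, pvGo]
      rw [if_pos hc, if_pos hc]
      exact ih (by omega) _ _

theorem pvA_eq_pvGo (p : String) :
    getMicParam p = pvGo p.toList.reverse [] false := by
  have hl : PySem.Str.len p = ((p.toList.length : Nat) : Int) := by simp
  rw [getMicParam, hl, pvLoopA_eq_pvGo p.toList p.toList.length le_rfl]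
  rw [List.take_of_length_le le_rfl]

theorem pvLast?_none_iff (s : List Char) : pvLast? s = none ↔ '/' ∉ s := by
  induction s with
  | nil => simp [pvLast?]
  | cons c t ih =>
    show (match pvLast? t with
        | some j => some (j + 1)
        | none => if c = '/' then some 0 else none) = none ↔ '/' ∉ c :: t
    cases h : pvLast? t with
    | some j =>
      have ht : '/' ∈ t := by
        by_contra hn; rw [← ih] at hn; rw [h] at hn; cases hn
      simp [List.mem_cons, ht]
    | none =>
      have ht : '/' ∉ t := ih.mp h
      by_cases hc : c = '/'
      · simp [hc]
      · simp only [List.mem_cons, not_or]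
        simp [hc, ht, Ne.symm hc]

theorem pvLast?_append_single (xs : List Char) (c : Char) :
    pvLast? (xs ++ [c]) = if c = '/' then some xs.length else pvLast? xs := by
  induction xs with
  | nil => simp [pvLast?]
  | cons d t ih =>
    show (match pvLast? (t ++ [c]) with
        | some j => some (j + 1)
        | none => if d = '/' then some 0 else none) = _
    rw [ih]
    by_cases hc : c = '/'
    · simp [hc]
    · simp only [if_neg hc]
      rfl

theorem pvLast?_decomp (s : List Char) (j : Nat) (h : pvLast? s = some j) :
    ∃ u v, s = u ++ '/' :: v ∧ u.length = j ∧ '/' ∉ v := by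
  induction s generalizing j with
  | nil => cases h
  | cons c t ih =>
    rw [show pvLast? (c :: t) = (match pvLast? t with
        | some j => some (j + 1)
        | none => if c = '/' then some 0 else none) from rfl] at h
    cases ht : pvLast? t with
    | some j' =>
      rw [ht] at h
      have hj : j = j' + 1 := by cases h; rfl
      obtain ⟨u, v, rfl, hu, hv⟩ := ih j' ht
      exact ⟨c :: u, v, by simp, by simp [hu, hj], hv⟩
    | none =>
      rw [ht] at h
      by_cases hc : c = '/'
      · rw [if_pos hc] at h
        have hj : j = 0 := by cases h; rfl
        exact ⟨[], t, by simp [hc], by simp [hj], (pvLast?_none_iff t).mp ht⟩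
      · rw [if_neg hc] at h; cases h

theorem pvGo_no_slash (y : List Char) (hy : '/' ∉ y) (param : List Char) (flag : Bool) :
    pvGo y param flag = none := by
  induction y generalizing param flag with
  | nil => rfl
  | cons c t ih =>
    simp only [List.mem_cons, not_or] at hy
    have hc : c ≠ '/' := fun he => hy.1 he.symm
    show (if c ≠ '/' then pvGo t (param ++ [c]) flag
        else if flag = false then pvGo t [] true
        else some (String.ofList param.reverse)) = none
    rw [if_pos hc]
    exact ih hy.2 _ _

theorem pvGo_phase1 (a : List Char) (ha : '/' ∉ a) (z : List Char) (param : List Char) :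
    pvGo (a ++ '/' :: z) param false = pvGo z [] true := by
  induction a generalizing param with
  | nil =>
    show (if ('/' : Char) ≠ '/' then _ else if (false : Bool) = false then pvGo z [] true else _) = pvGo z [] true
    simp
  | cons c t ih =>
    simp only [List.mem_cons, not_or] at ha
    have hc : c ≠ '/' := fun he => ha.1 he.symm
    show (if c ≠ '/' then pvGo (t ++ '/' :: z) (param ++ [c]) false
        else if (false : Bool) = false then pvGo (t ++ '/' :: z) [] true
        else some (String.ofList param.reverse)) = pvGo z [] true
    rw [if_pos hc]
    exact ih ha.2 _

theorem pvGo_phase2 (y : List Char) (hy : '/' ∉ y) (z acc : List Char) :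
    pvGo (y ++ '/' :: z) acc true = some (String.ofList (acc ++ y).reverse) := by
  induction y generalizing acc with
  | nil =>
    show (if ('/' : Char) ≠ '/' then _
        else if (true : Bool) = false then _ else some (String.ofList acc.reverse)) = _
    simp
  | cons c t ih =>
    simp only [List.mem_cons, not_or] at hy
    have hc : c ≠ '/' := fun he => hy.1 he.symm
    show (if c ≠ '/' then pvGo (t ++ '/' :: z) (acc ++ [c]) true
        else if (true : Bool) = false then pvGo (t ++ '/' :: z) [] true
        else some (String.ofList acc.reverse)) = _
    rw [if_pos hc, ih hy.2]
    simp

theorem pvPrefixSingle (l : List Char) (i : Nat) :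
    (['/'].isPrefixOf (l.drop i)) = (l[i]? == some '/') := by
  rcases h : l.drop i with _ | ⟨c, t⟩
  · have : l[i]? = none := by
      rw [List.getElem?_eq_none_iff]
      by_contra hh
      have := List.drop_eq_nil_iff.mp h; omega
    simp [this, List.isPrefixOf]
  · have : l[i]? = some c := by
      have h2 : (l.drop i)[0]? = l[i + 0]? := List.getElem?_drop
      rw [h] at h2; simpa using h2.symm
    simp [this, List.isPrefixOf, eq_comm]

theorem pvGo_spec (s : List Char) (k : Nat) :
    PySem.Chars.rfind.go s ['/'] k
      = match pvLast? (s.take (k + 1)) with | none => -1 | some j => (j : Int) := by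
  induction k with
  | zero =>
    rw [PySem.Chars.rfind.go]
    have := pvPrefixSingle s 0
    simp only [List.drop_zero] at this
    rw [this]
    rcases hs : s with _ | ⟨c, t⟩
    · simp [pvLast?]
    · simp only [List.take_succ_cons, List.take_zero]
      show _ = (match (match pvLast? ([] : List Char) with
          | some j => some (j + 1)
          | none => if c = '/' then some 0 else none) with | none => (-1 : Int) | some j => (j : Int))
      by_cases hc : c = '/'
      · simp [hc, pvLast?]
      · simp [hc, pvLast?]
  | succ k ih =>
    rw [PySem.Chars.rfind.go]
    rw [pvPrefixSingle]
    by_cases hlt : k + 1 < s.length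
    · have htake : s.take (k + 2) = s.take (k + 1) ++ [s[k+1]] := by
        rw [List.take_add_one, List.getElem?_eq_getElem hlt]; rfl
      rw [htake, pvLast?_append_single, List.getElem?_eq_getElem hlt]
      by_cases hc : s[k+1] = '/'
      · simp [hc, List.length_take, Nat.min_eq_left (by omega : k + 1 ≤ s.length)]
      · have hb : (some s[k+1] == some '/') = false := by simp [hc]
        rw [hb, if_neg hc]
        simp only [Bool.false_eq_true, if_false]
        rw [ih]
    · have h1 : s[k+1]? = none := by rw [List.getElem?_eq_none_iff]; omega
      have h2 : s.take (k + 2) = s := List.take_of_length_le (by omega)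
      have h3 : s.take (k + 1) = s := List.take_of_length_le (by omega)
      rw [h1, ih, h2, h3]
      simp

theorem pvRfind_spec (s : List Char) :
    PySem.Chars.rfind s ['/'] = match pvLast? s with | none => -1 | some j => (j : Int) := by
  rw [PySem.Chars.rfind, pvGo_spec, List.take_of_length_le (by omega)]

theorem pvRfindFrom_spec (s : List Char) (j : Nat) (hj : j < s.length) :
    PySem.Chars.rfindFrom s ['/'] 0 (some (j : Int))
      = match pvLast? (s.take j) with | none => -1 | some p => (p : Int) := by
  simp only [PySem.Chars.rfindFrom]
  rw [if_neg (by push_cast; omega : ¬ ((s.length : Int) < (j : Int))),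
      if_neg (by push_cast; omega : ¬ ((j : Int) < 0))]
  norm_num
  rw [if_neg (by push_cast; omega : ¬ ((j : Int) < 0))]
  rw [pvRfind_spec]
  rcases hp : pvLast? (s.take j) with _ | p
  · simp
  · simp

theorem pv_main (p : String) : getMicParam p = getMicParam_alt p := by
  rw [pvA_eq_pvGo]
  unfold getMicParam_alt
  simp only [PySem.Str.rfind_eq, PySem.Str.rfindFrom_eq, show ("/" : String).toList = ['/'] from rfl]
  rw [pvRfind_spec]
  cases h1 : pvLast? p.toList with
  | none =>
    rw [pvGo_no_slash _ (by rw [List.mem_reverse]; exact (pvLast?_none_iff _).mp h1)]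
    simp
  | some j =>
    simp only
    rw [if_neg (by omega : ¬ ((j : Int) = -1))]
    obtain ⟨u, v, hs, hu, hv⟩ := pvLast?_decomp _ _ h1
    have hjlen : j < p.toList.length := by rw [hs, ← hu]; simp
    rw [pvRfindFrom_spec _ j hjlen]
    have htu : p.toList.take j = u := by rw [hs, ← hu, List.take_left]
    rw [htu]
    cases h2 : pvLast? u with
    | none =>
      have hrev : p.toList.reverse = v.reverse ++ '/' :: u.reverse := by rw [hs]; simp
      rw [hrev, pvGo_phase1 _ (by rw [List.mem_reverse]; exact hv),
          pvGo_no_slash u.reverse (by rw [List.mem_reverse]; exact (pvLast?_none_iff u).mp h2)]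
      simp
    | some q =>
      simp only
      rw [if_neg (by omega : ¬ ((q : Int) = -1))]
      obtain ⟨w, x, huw, hw, hx⟩ := pvLast?_decomp u q h2
      have hrev : p.toList.reverse = v.reverse ++ '/' :: (x.reverse ++ '/' :: w.reverse) := by
        rw [hs, huw]; simp
      rw [hrev, pvGo_phase1 _ (by rw [List.mem_reverse]; exact hv),
          pvGo_phase2 x.reverse (by rw [List.mem_reverse]; exact hx)]
      have hq1 : (q : Int) + 1 = ((q + 1 : Nat) : Int) := by push_cast; ring
      have hslice : (PySem.Str.slice p (some ((q : Int) + 1)) (some (j : Int))).toList = x := by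
        rw [PySem.Str.toList_slice, PySem.Chars.slice_eq_listSlice, hq1,
            PySem.List.slice_natCast]
        have hsplit : p.toList = (w ++ ['/']) ++ (x ++ '/' :: v) := by rw [hs, huw]; simp
        have hql : q + 1 = (w ++ ['/']).length := by simp [← hw]
        have hjq : j - (q + 1) = x.length := by
          rw [← hu, huw, ← hw]; simp; omega
        rw [hsplit, hql, List.drop_left, ← hql, hjq, List.take_left']
        simp
      conv_rhs => rw [← String.ofList_toList (s := PySem.Str.slice p (some ((q : Int) + 1)) (some (j : Int)))]
      rw [hslice]
      simp

-- ===== VERDICT (by name: the statement is the Claim_ definition above) =====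
theorem getMicParam_spec : Claim_equal_getMicParam := by
  intro p _
  unfold Spec_getMicParam
  exact pv_main p
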